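-- pv_equiv track=rewrite | github.com/TapkiGroup/debate-coach | app/backend/agents/supervisor/policies.py | only_one_executor
-- ===== SOURCE A (Python) =====
-- def only_one_executor(plan_steps: list[str]) -> list[str]:
--     seen = False
--     cleaned = []
--     for s in plan_steps:
--         if s.startswith("EXECUTOR:"):
--             if seen:
--                 continue
--             seen = True
--         cleaned.append(s)
--     return cleaned
-- ===== SOURCE B (Python) =====
-- def only_one_executor(plan_steps: list[str]) -> list[str]:
--     first = next((i for i, s in enumerate(plan_steps) if s.startswith("EXECUTOR:")), None)
--     return [s for i, s in enumerate(plan_steps)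
--             if not s.startswith("EXECUTOR:") or i == first]
-- ===== Notes on version B (the rewrite author's own statement) =====
-- stated objective: alternative
-- what changed: Replaces the stateful single pass with a mutable seen flag by a two-phase find-then-filter: compute the index of the first EXECUTOR step, then keep a step iff it is not an EXECUTOR step or sits at that index.
import Mathlib
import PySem

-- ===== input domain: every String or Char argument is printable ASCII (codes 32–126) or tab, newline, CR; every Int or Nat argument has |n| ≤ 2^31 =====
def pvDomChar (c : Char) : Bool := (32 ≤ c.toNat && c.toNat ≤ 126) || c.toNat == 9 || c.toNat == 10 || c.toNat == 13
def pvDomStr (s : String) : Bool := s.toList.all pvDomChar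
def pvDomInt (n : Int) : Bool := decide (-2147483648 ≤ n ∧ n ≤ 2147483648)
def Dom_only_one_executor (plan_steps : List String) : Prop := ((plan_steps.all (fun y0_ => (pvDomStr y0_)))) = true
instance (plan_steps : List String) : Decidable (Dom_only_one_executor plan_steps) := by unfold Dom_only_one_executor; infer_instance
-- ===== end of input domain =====

-- B replaces A's stateful single pass (mutable seen flag) by find-the-first-EXECUTOR-index then an index-aware filter; same cost.

-- ===== PORT A =====
def only_one_executor (plan_steps : List String) : List String :=
  (plan_steps.foldl
    (fun (st : Bool × List String) s =>
      if PySem.Str.startswith s "EXECUTOR:" then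
        if st.1 then st else (true, st.2 ++ [s])
      else (st.1, st.2 ++ [s]))
    (false, [])).2

-- ===== PORT B =====
def only_one_executor_alt (plan_steps : List String) : List String :=
  let first : Option Int :=
    ((PySem.List.enumerate plan_steps).find? (fun p => PySem.Str.startswith p.2 "EXECUTOR:")).map (·.1)
  ((PySem.List.enumerate plan_steps).filter
      (fun p => !PySem.Str.startswith p.2 "EXECUTOR:" || first == some p.1)).map (·.2)

-- ===== PRECONDITION & SPEC =====
def Spec_only_one_executor (plan_steps : List String) (out : List String) : Prop := out = only_one_executor_alt plan_steps
instance (plan_steps : List String) (out : List String) : Decidable (Spec_only_one_executor plan_steps out) := by unfold Spec_only_one_executor; infer_instance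

-- ===== CLAIM (what is proved, stated in full; the proofs are below) =====
def Claim_equal_only_one_executor : Prop := ∀ (plan_steps : List String), Dom_only_one_executor plan_steps → Spec_only_one_executor plan_steps (only_one_executor plan_steps)

-- ===== LEMMAS AND PROOFS =====

-- canonical form: first P-step kept, all later P-steps dropped (instantiated with startswith "EXECUTOR:")
def pvKeep (P : String → Bool) : List String → List String
  | [] => []
  | s :: t => if P s then s :: t.filter (fun x => !P x) else s :: pvKeep P t

theorem pvA_true (P : String → Bool) (t : List String) (acc : List String) :
    (t.foldl
      (fun (st : Bool × List String) s =>
        if P s then if st.1 then st else (true, st.2 ++ [s])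
        else (st.1, st.2 ++ [s]))
      (true, acc)).2 = acc ++ t.filter (fun x => !P x) := by
  induction t generalizing acc with
  | nil => simp
  | cons x t ih =>
    by_cases h : P x = true <;> simp [List.foldl, h, ih]

theorem pvA_false (P : String → Bool) (t : List String) (acc : List String) :
    (t.foldl
      (fun (st : Bool × List String) s =>
        if P s then if st.1 then st else (true, st.2 ++ [s])
        else (st.1, st.2 ++ [s]))
      (false, acc)).2 = acc ++ pvKeep P t := by
  induction t generalizing acc with
  | nil => simp [pvKeep]
  | cons x t ih =>
    by_cases h : P x = true
    · simp [List.foldl, h, pvKeep, pvA_true]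
    · simp [List.foldl, h, pvKeep, ih]

theorem pvB_high (P : String → Bool) (t : List String) (n : Int) (m : Int) (h : n < m) :
    ((PySem.List.enumerate t m).filter
        (fun p => !P p.2 || n == p.1)).map (·.2)
      = t.filter (fun x => !P x) := by
  induction t generalizing m with
  | nil => simp [PySem.List.enumerate_nil]
  | cons x t ih =>
    have hne : (n == m) = false := by simp; omega
    by_cases hx : P x = true <;>
      simp [PySem.List.enumerate_cons, hx, hne, ih (m + 1) (by omega)]

theorem pvB_general (P : String → Bool) (t : List String) (n : Int) :
    ((PySem.List.enumerate t n).filter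
        (fun p => !P p.2 ||
          ((PySem.List.enumerate t n).find? (fun q => P q.2)).map (·.1) == some p.1)).map (·.2)
      = pvKeep P t := by
  induction t generalizing n with
  | nil => simp [PySem.List.enumerate_nil, pvKeep]
  | cons x t ih =>
    by_cases hx : P x = true
    · simp only [PySem.List.enumerate_cons, List.find?_cons, hx, Option.map_some,
        List.filter_cons, pvKeep, if_pos]
      simp [pvB_high P t n (n + 1) (by omega)]
    · simp only [PySem.List.enumerate_cons, List.find?_cons, hx,
        List.filter_cons, pvKeep]
      simp only [Bool.not_false, Bool.true_or, if_pos, List.map_cons]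
      rw [ih (n + 1)]
      simp

-- ===== VERDICT (by name: the statement is the Claim_ definition above) =====
theorem only_one_executor_spec : Claim_equal_only_one_executor := by
  intro ps _
  show _ = _
  rw [only_one_executor, only_one_executor_alt,
    pvA_false (fun s => PySem.Str.startswith s "EXECUTOR:"),
    pvB_general (fun s => PySem.Str.startswith s "EXECUTOR:")]
  simp
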